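-- pv_equiv track=rewrite | github.com/firedynasty/vercel_youtubeviewer | grab_shakespeare_reader_v3/replace_lines.py | smart_merge_lines
-- ===== SOURCE A (Python) =====
-- def smart_merge_lines(lines, target_count):
--     """
--     Merge lines down to target_count by combining adjacent lines.
--     """
--     while len(lines) > target_count:
--         # Find the two shortest adjacent lines to merge
--         min_idx = 0
--         min_len = len(lines[0].strip()) + len(lines[1].strip())
--
--         for i in range(len(lines) - 1):
--             combined_len = len(lines[i].strip()) + len(lines[i+1].strip())
--             if combined_len < min_len:
--                 min_len = combined_len
--                 min_idx = i
--
--         # Merge the two lines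
--         merged = lines[min_idx].strip() + ' ' + lines[min_idx + 1].strip() + '\n'
--         lines[min_idx] = merged
--         lines.pop(min_idx + 1)
--
--     return lines
-- ===== SOURCE B (Python) =====
-- def _push(q, entry):
--     # insert entry into the sorted queue, keeping it sorted (stable: after equals)
--     k = 0
--     while k < len(q) and q[k] < entry:
--         k += 1
--     q.insert(k, entry)
--
--
-- def smart_merge_lines(lines, target_count):
--     # Lazy-deletion priority queue (a sorted candidate list) over a doubly
--     # linked list of segments: each merge pops the cheapest valid adjacent
--     # pair and re-queues only the two neighbouring pair costs, instead of
--     # re-stripping and rescanning every line each round.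
--     # (A mutates `lines` in place; B leaves it untouched - return values agree.)
--     n = len(lines)
--     if n <= target_count:
--         return lines
--     text = list(lines)
--     key = [s.strip() for s in lines]
--     alive = [True] * n
--     nxt = [i + 1 if i + 1 < n else None for i in range(n)]
--     prv = [i - 1 if i > 0 else None for i in range(n)]
--     gen = [0] * n
--     q = []
--     for i in range(n - 1):
--         _push(q, (len(key[i]) + len(key[i + 1]), i, 0))
--     count = n
--     while count > target_count:
--         cost, i, g = q.pop(0)
--         if not alive[i] or gen[i] != g or nxt[i] is None:
--             continue  # stale entry
--         j = nxt[i]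
--         text[i] = key[i] + ' ' + key[j] + '\n'
--         key[i] = text[i].strip()
--         alive[j] = False
--         nxt[i] = nxt[j]
--         gen[i] += 1
--         k = nxt[i]
--         if k is not None:
--             prv[k] = i
--             _push(q, (len(key[i]) + len(key[k]), i, gen[i]))
--         p = prv[i]
--         if p is not None:
--             gen[p] += 1
--             _push(q, (len(key[p]) + len(key[i]), p, gen[p]))
--         count -= 1
--     out = []
--     cur = 0
--     while cur is not None:
--         out.append(text[cur])
--         cur = nxt[cur]
--     return out
-- ===== Notes on version B (the rewrite author's own statement) =====
-- stated objective: alternative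
-- what changed: B replaces A's per-round re-strip-and-rescan with a lazy-deletion priority queue (a sorted candidate list keyed by (cost, left index, generation)) over a doubly linked list of segments: lines are stripped once, each merge pops the cheapest valid adjacent pair and re-queues only the two neighbouring pair costs; A instead strips every line and scans all adjacent pairs on every round and mutates the input list in place (B does not).
import Mathlib
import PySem

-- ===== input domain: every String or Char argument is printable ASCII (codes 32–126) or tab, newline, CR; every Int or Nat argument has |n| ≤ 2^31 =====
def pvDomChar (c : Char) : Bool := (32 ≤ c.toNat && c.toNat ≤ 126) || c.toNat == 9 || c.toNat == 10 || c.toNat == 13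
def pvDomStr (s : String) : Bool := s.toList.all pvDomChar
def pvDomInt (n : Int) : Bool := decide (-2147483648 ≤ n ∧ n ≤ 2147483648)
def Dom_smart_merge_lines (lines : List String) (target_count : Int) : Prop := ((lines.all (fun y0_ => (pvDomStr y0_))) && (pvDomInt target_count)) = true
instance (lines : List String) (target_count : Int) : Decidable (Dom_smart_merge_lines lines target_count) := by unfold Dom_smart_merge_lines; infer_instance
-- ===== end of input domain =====

-- B replaces A's per-round re-strip + full rescan with a lazy-deletion priority
-- queue (a sorted candidate list) over a doubly linked list of segments: each
-- merge pops the cheapest valid adjacent pair and re-queues only the two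
-- neighbouring pair costs.  A mutates its argument in place, B does not: the
-- equivalence proved here is about the RETURN value.

-- ===== PORT A =====
-- combined stripped length of lines[i] and lines[i+1]; indices produced by the loop
-- are always in range, so the total pyGetD form is exact there
def pvCombined (lines : List String) (i : Int) : Int :=
  PySem.Str.len (PySem.Str.strip (PySem.List.pyGetD lines i "")) +
  PySem.Str.len (PySem.Str.strip (PySem.List.pyGetD lines (i + 1) ""))

-- the `for i in range(len(lines)-1)` running-argmin scan, state (min_idx, min_len)
def pvScan (lines : List String) : Int × Int :=
  (PySem.List.pyRange 0 ((lines.length : Int) - 1) 1).foldl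
    (fun st i => if pvCombined lines i < st.2 then (i, pvCombined lines i) else st)
    (0, pvCombined lines 0)

-- one round of A: build merged, lines[min_idx] = merged, lines.pop(min_idx+1)
def pvMergeA (lines : List String) : List String :=
  let mi := (pvScan lines).1
  let merged := PySem.Str.strip (PySem.List.pyGetD lines mi "") ++ " " ++
                PySem.Str.strip (PySem.List.pyGetD lines (mi + 1) "") ++ "\n"
  let lines' := PySem.List.pySetD lines mi merged
  ((PySem.List.pop? lines' (mi + 1)).map (·.2)).getD lines'

-- the `while len(lines) > target_count` loop; fuel = initial length bounds the
-- number of merges (each round removes one line), so fuel never runs out on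
-- inputs where the Python returns
def pvLoopA : Nat → List String → Int → List String
  | 0, lines, _ => lines
  | fuel + 1, lines, t =>
    if (lines.length : Int) > t then pvLoopA fuel (pvMergeA lines) t else lines

def smart_merge_lines (lines : List String) (target_count : Int) : List String :=
  pvLoopA lines.length lines target_count

-- ===== PORT B =====
-- Python's lexicographic `<` on the (cost, index, generation) tuples
def pvEntLt (a b : Int × Nat × Nat) : Bool :=
  decide (a.1 < b.1) ||
    (decide (a.1 = b.1) &&
      (decide (a.2.1 < b.2.1) || (decide (a.2.1 = b.2.1) && decide (a.2.2 < b.2.2))))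

-- Source B's _push: walk past the entries smaller than the new one, insert there
def pvPush (q : List (Int × Nat × Nat)) (e : Int × Nat × Nat) : List (Int × Nat × Nat) :=
  match q with
  | [] => [e]
  | x :: xs => if pvEntLt x e then x :: pvPush xs e else e :: x :: xs

-- Source B's loop state: parallel per-node lists, sorted queue, live-segment count
structure PvStB where
  text : List String
  key : List String
  alive : List Bool
  nxt : List (Option Nat)
  prv : List (Option Nat)
  gen : List Nat
  q : List (Int × Nat × Nat)
  count : Nat

-- `for i in range(n - 1): _push(q, (len(key[i]) + len(key[i+1]), i, 0))`
def pvBuildQ (key : List String) : List (Int × Nat × Nat) :=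
  (List.range (key.length - 1)).foldl
    (fun q i =>
      pvPush q (PySem.Str.len (key.getD i "") + PySem.Str.len (key.getD (i + 1) ""), i, 0))
    []

-- the body of one merge (the loop's else branch): splice out j, refresh the two
-- neighbouring candidate entries, decrement the live count
def pvMergeBState (st : PvStB) (i j : Nat) (rest : List (Int × Nat × Nat)) : PvStB :=
  let txt := st.key.getD i "" ++ " " ++ st.key.getD j "" ++ "\n"
  let k := st.nxt.getD j none
  let st1 : PvStB :=
    { st with text := st.text.set i txt,
              key := st.key.set i (PySem.Str.strip txt),
              alive := st.alive.set j false,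
              nxt := st.nxt.set i k,
              gen := st.gen.set i (st.gen.getD i 0 + 1),
              q := rest }
  let st2 : PvStB :=
    match k with
    | some k' =>
      { st1 with
          prv := st1.prv.set k' (some i),
          q := pvPush st1.q
            (PySem.Str.len (st1.key.getD i "") + PySem.Str.len (st1.key.getD k' ""),
             i, st1.gen.getD i 0) }
    | none => st1
  let st3 : PvStB :=
    match st2.prv.getD i none with
    | some p =>
      { st2 with
          gen := st2.gen.set p (st2.gen.getD p 0 + 1),
          q := pvPush st2.q
            (PySem.Str.len (st2.key.getD p "") + PySem.Str.len (st2.key.getD i ""),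
             p, st2.gen.getD p 0 + 1) }
    | none => st2
  { st3 with count := st3.count - 1 }

-- the `while count > target_count` loop; fuel bounds the number of pops, which
-- is at most |q| + 2·count on inputs where the Python returns (each iteration
-- pops one entry; a merge pushes at most two and decrements count)
def pvLoopB : Nat → PvStB → Int → PvStB
  | 0, st, _ => st
  | fuel + 1, st, t =>
    if (st.count : Int) > t then
      match st.q with
      | [] => st   -- Python: q.pop(0) raises IndexError here (outside Pre_)
      | (_, i, g) :: rest =>
        -- `if not alive[i] or gen[i] != g or nxt[i] is None: continue`
        match st.nxt.getD i none with
        | none => pvLoopB fuel { st with q := rest } t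
        | some j =>
          if st.alive.getD i false = false ∨ st.gen.getD i 0 ≠ g then
            pvLoopB fuel { st with q := rest } t
          else
            pvLoopB fuel (pvMergeBState st i j rest) t
    else st

-- the output loop `while cur is not None: out.append(text[cur]); cur = nxt[cur]`;
-- fuel = n bounds the chain length
def pvChainOut (text : List String) (nxt : List (Option Nat)) : Nat → Nat → List String
  | 0, _ => []
  | fuel + 1, cur =>
    text.getD cur "" ::
      (match nxt.getD cur none with
       | none => []
       | some nx => pvChainOut text nxt fuel nx)

-- the initial state: original lines, keys stripped once, identity links, empty
-- generations, all initial adjacent-pair entries pushed into the queue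
def pvInitB (lines : List String) : PvStB :=
  { text := lines,
    key := lines.map (fun s => PySem.Str.strip s),
    alive := List.replicate lines.length true,
    nxt := (List.range lines.length).map (fun i => if i + 1 < lines.length then some (i + 1) else none),
    prv := (List.range lines.length).map (fun i => if 0 < i then some (i - 1) else none),
    gen := List.replicate lines.length 0,
    q := pvBuildQ (lines.map (fun s => PySem.Str.strip s)),
    count := lines.length }

def smart_merge_lines_alt (lines : List String) (target_count : Int) : List String :=
  if (lines.length : Int) ≤ target_count then lines
  else
    pvChainOut
      (pvLoopB ((pvInitB lines).q.length + 2 * lines.length) (pvInitB lines) target_count).text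
      (pvLoopB ((pvInitB lines).q.length + 2 * lines.length) (pvInitB lines) target_count).nxt
      lines.length 0

-- ===== PRECONDITION & SPEC =====
-- exactly the inputs on which A returns: with a nonempty list A keeps merging while
-- len > target and indexes lines[1] once len = 1, so target_count ≥ 1 is needed;
-- on the empty list only target_count < 0 loops into lines[0] (IndexError)
def Pre_smart_merge_lines (lines : List String) (target_count : Int) : Prop :=
  (lines = [] ∧ 0 ≤ target_count) ∨ 1 ≤ target_count
instance (lines : List String) (target_count : Int) : Decidable (Pre_smart_merge_lines lines target_count) := by unfold Pre_smart_merge_lines; infer_instance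

def pvWitness_smart_merge_lines : List String × Int := (["alpha  ", "  bb", "c d"], 1)

def Spec_smart_merge_lines (lines : List String) (target_count : Int) (out : List String) : Prop := out = smart_merge_lines_alt lines target_count
instance (lines : List String) (target_count : Int) (out : List String) : Decidable (Spec_smart_merge_lines lines target_count out) := by unfold Spec_smart_merge_lines; infer_instance

-- ===== CLAIM (what is proved, stated in full; the proofs are below) =====
def Claim_equal_smart_merge_lines : Prop := ∀ (lines : List String) (target_count : Int), Dom_smart_merge_lines lines target_count → Pre_smart_merge_lines lines target_count → Spec_smart_merge_lines lines target_count (smart_merge_lines lines target_count)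

-- ===== LEMMAS AND PROOFS =====

-- ---------- small list helpers ----------

lemma pv_getD_set {α : Type} (l : List α) (i j : Nat) (v d : α) :
    (l.set i v).getD j d = if i = j ∧ i < l.length then v else l.getD j d := by
  rcases Nat.lt_or_ge j l.length with hj | hj
  · by_cases hij : i = j
    · subst hij
      by_cases hi : i < l.length
      · simp [List.getD, hi]
      · omega
    · simp [List.getD, List.getElem?_set_ne (by omega : i ≠ j), hij]
  · have h1 : (l.set i v).length ≤ j := by simpa using hj
    rcases Nat.lt_or_ge i l.length with hi | hi
    · have hij : ¬ (i = j ∧ i < l.length) := by omega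
      simp [List.getD, List.getElem?_eq_none hj, List.getElem?_eq_none h1, hij]
    · have hij : ¬ (i = j ∧ i < l.length) := by omega
      simp [List.getD, List.getElem?_eq_none hj, List.getElem?_eq_none h1, hij]

lemma pv_getD_eq_getElem {α : Type} (l : List α) (s : Nat) (d : α) (h : s < l.length) :
    l.getD s d = l[s] := by
  simp [List.getD, List.getElem?_eq_getElem h]

lemma pv_getD_eraseIdx {α : Type} (l : List α) (m s : Nat) (d : α)
    (hs : s + 1 < l.length) :
    (l.eraseIdx m).getD s d = if s < m then l.getD s d else l.getD (s + 1) d := by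
  have hl : s < (l.eraseIdx m).length := by
    rw [List.length_eraseIdx]
    split_ifs <;> omega
  rw [pv_getD_eq_getElem _ _ _ hl]
  by_cases hm : s < m
  · rw [List.getElem_eraseIdx_of_lt _ hm, if_pos hm,
      pv_getD_eq_getElem _ _ _ (by omega)]
  · rw [List.getElem_eraseIdx_of_ge _ (by omega : m ≤ s), if_neg hm,
      pv_getD_eq_getElem _ _ _ (by omega)]

lemma pv_pairwise_getD_lt (l : List Nat) (h : l.Pairwise (· < ·)) (a b : Nat)
    (hab : a < b) (hb : b < l.length) : l.getD a 0 < l.getD b 0 := by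
  rw [pv_getD_eq_getElem _ _ _ (by omega), pv_getD_eq_getElem _ _ _ hb]
  exact List.pairwise_iff_getElem.1 h a b (by omega) hb hab

-- ---------- entry-order helpers ----------

lemma pvEntLt_asymm {a b : Int × Nat × Nat} (h : pvEntLt a b = true) : pvEntLt b a = false := by
  simp only [pvEntLt, Bool.or_eq_true, Bool.and_eq_true, decide_eq_true_eq,
    Bool.or_eq_false_iff, Bool.and_eq_false_iff, decide_eq_false_iff_not] at *
  omega

lemma pvEntLt_le_trans {a b c : Int × Nat × Nat} (h1 : pvEntLt b a = false)
    (h2 : pvEntLt c b = false) : pvEntLt c a = false := by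
  simp only [pvEntLt, Bool.or_eq_false_iff, Bool.and_eq_false_iff, decide_eq_false_iff_not] at *
  omega

lemma pv_cost_le_of_not_lt {a b : Int × Nat × Nat} (h : pvEntLt b a = false) : a.1 ≤ b.1 := by
  simp only [pvEntLt, Bool.or_eq_false_iff, Bool.and_eq_false_iff, decide_eq_false_iff_not] at h
  omega

lemma pvEntLt_of_same_cost {c : Int} {i i' g g' : Nat} (h : i' < i) :
    pvEntLt (c, i', g') (c, i, g) = true := by
  simp [pvEntLt, h]

def pvQSorted (q : List (Int × Nat × Nat)) : Prop :=
  q.Pairwise (fun a b => pvEntLt b a = false)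

lemma pv_mem_push (q : List (Int × Nat × Nat)) (e x : Int × Nat × Nat) :
    x ∈ pvPush q e ↔ x = e ∨ x ∈ q := by
  induction q with
  | nil => simp [pvPush]
  | cons y ys ih =>
    by_cases h : pvEntLt y e = true
    · rw [pvPush, if_pos h]
      simp only [List.mem_cons, ih]
      tauto
    · simp only [pvPush, if_neg h, List.mem_cons]

lemma pv_push_sorted (q : List (Int × Nat × Nat)) (e : Int × Nat × Nat)
    (h : pvQSorted q) : pvQSorted (pvPush q e) := by
  induction q with
  | nil => simp [pvPush, pvQSorted]
  | cons y ys ih =>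
    rw [pvQSorted, List.pairwise_cons] at h
    obtain ⟨hy, hys⟩ := h
    by_cases hlt : pvEntLt y e = true
    · rw [pvQSorted, pvPush, if_pos hlt, List.pairwise_cons]
      refine ⟨?_, ih hys⟩
      intro x hx
      rcases (pv_mem_push ys e x).1 hx with rfl | hx
      · exact pvEntLt_asymm hlt
      · exact hy x hx
    · rw [pvQSorted, pvPush, if_neg hlt, List.pairwise_cons]
      have hle : pvEntLt y e = false := by
        cases hye : pvEntLt y e
        · rfl
        · exact absurd hye hlt
      refine ⟨?_, ?_⟩
      · intro x hx
        rcases List.mem_cons.1 hx with rfl | hx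
        · exact hle
        · exact pvEntLt_le_trans hle (hy x hx)
      · rw [pvQSorted, List.pairwise_cons] at *
        exact ⟨hy, hys⟩

lemma pv_push_length (q : List (Int × Nat × Nat)) (e : Int × Nat × Nat) :
    (pvPush q e).length = q.length + 1 := by
  induction q with
  | nil => rfl
  | cons y ys ih =>
    by_cases h : pvEntLt y e = true
    · simp [pvPush, h, ih]
    · simp [pvPush, h]

lemma pv_mem_eraseIdx_nodup {α : Type} [DecidableEq α] (l : List α) (hnd : l.Nodup)
    (m : Nat) (hm : m < l.length) (x : α) :
    x ∈ l.eraseIdx m ↔ x ∈ l ∧ x ≠ l[m] := by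
  have hdec : l = l.take m ++ l[m] :: l.drop (m + 1) := by
    rw [List.getElem_cons_drop, List.take_append_drop]
  have hnd' : (l.take m ++ l[m] :: l.drop (m + 1)).Nodup := hdec ▸ hnd
  rw [List.nodup_append] at hnd'
  obtain ⟨h1, h2, hdisj⟩ := hnd'
  rw [List.nodup_cons] at h2
  rw [List.eraseIdx_eq_take_drop_succ]
  constructor
  · intro hx
    rcases List.mem_append.1 hx with hx | hx
    · exact ⟨by rw [hdec]; exact List.mem_append.2 (Or.inl hx),
        fun hxe => hdisj _ hx _ List.mem_cons_self (by rw [hxe])⟩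
    · exact ⟨by rw [hdec]; exact List.mem_append.2 (Or.inr (List.mem_cons_of_mem _ hx)),
        fun hxe => h2.1 (hxe ▸ hx)⟩
  · rintro ⟨hx, hne⟩
    rw [hdec] at hx
    rcases List.mem_append.1 hx with hx | hx
    · exact List.mem_append.2 (Or.inl hx)
    · rcases List.mem_cons.1 hx with rfl | hx
      · exact absurd rfl hne
      · exact List.mem_append.2 (Or.inr hx)

-- ---------- index? helper ----------

lemma pv_index?_eq_some_of {α : Type} [BEq α] [LawfulBEq α] (xs : List α) (v : α) (k : Nat)
    (hk : k < xs.length) (hv : xs[k] = v) (hfirst : ∀ j (hj : j < k), xs[j]'(by omega) ≠ v) :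
    PySem.List.index? xs v = some k := by
  induction xs generalizing k with
  | nil => simp at hk
  | cons x xs ih =>
    cases k with
    | zero =>
      simp only [List.getElem_cons_zero] at hv
      subst hv
      exact PySem.List.index?_cons_self x xs
    | succ k =>
      have hx : x ≠ v := by
        have := hfirst 0 (by omega)
        simpa using this
      rw [PySem.List.index?_cons_of_ne xs hx,
        ih k (by simpa using hk) (by simpa using hv)
          (fun j hj => by simpa using hfirst (j + 1) (by omega))]
      rfl

-- ---------- the minimum of the sums list ----------

def pvMinOf (s : List Int) : Int := s.tail.foldl min s.headI

def pvSums (L : List String) : List Int :=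
  List.zipWith
    (fun a b => PySem.Str.len (PySem.Str.strip a) + PySem.Str.len (PySem.Str.strip b)) L L.tail

def pvMergedStr (L : List String) (r : Nat) : String :=
  PySem.Str.strip (L.getD r "") ++ " " ++ PySem.Str.strip (L.getD (r + 1) "") ++ "\n"

def pvArgmin (L : List String) : Nat :=
  (PySem.List.index? (pvSums L) (pvMinOf (pvSums L))).getD 0

lemma pv_sums_length (L : List String) : (pvSums L).length = L.length - 1 := by
  simp [pvSums, List.length_zipWith, List.length_tail]

lemma pv_sums_getD (L : List String) (s : Nat) (hs : s + 1 < L.length) :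
    (pvSums L).getD s 0 =
      PySem.Str.len (PySem.Str.strip (L.getD s "")) +
      PySem.Str.len (PySem.Str.strip (L.getD (s + 1) "")) := by
  have hlen : s < (pvSums L).length := by rw [pv_sums_length]; omega
  rw [pv_getD_eq_getElem _ _ _ hlen, pv_getD_eq_getElem _ _ _ (by omega : s < L.length),
    pv_getD_eq_getElem _ _ _ (by omega : s + 1 < L.length)]
  simp only [pvSums, List.getElem_zipWith, List.getElem_tail]

lemma pv_minOf_mem (s : List Int) (hs : s ≠ []) : pvMinOf s ∈ s := by
  obtain ⟨x, tl, rfl⟩ := List.exists_cons_of_ne_nil hs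
  rcases PySem.List.foldl_min_mem tl x with h | h
  · rw [pvMinOf]; simp only [List.tail_cons, List.headI_cons]
    rw [h]; exact List.mem_cons_self
  · exact List.mem_cons_of_mem _ (by rw [pvMinOf]; simpa using h)

lemma pv_minOf_le (s : List Int) (hs : s ≠ []) : ∀ z ∈ s, pvMinOf s ≤ z := by
  obtain ⟨x, tl, rfl⟩ := List.exists_cons_of_ne_nil hs
  intro z hz
  have h := PySem.List.foldl_min_le tl x
  rcases List.mem_cons.1 hz with rfl | hz
  · exact h.1
  · exact h.2 z hz

lemma pv_minOf_eq (s : List Int) (c : Int) (hc : c ∈ s) (hle : ∀ z ∈ s, c ≤ z) :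
    pvMinOf s = c := by
  have h1 := pv_minOf_le s (by rintro rfl; simp at hc) c hc
  have h2 := hle _ (pv_minOf_mem s (by rintro rfl; simp at hc))
  omega

-- A's running-argmin fold returns (first index of the minimum, minimum value)
lemma pv_fold_argmin (s : List Int) (hs : s ≠ []) :
    (PySem.List.enumerate s 0).foldl
        (fun (st : Int × Int) p => if p.2 < st.2 then p else st) (0, s.headI)
      = ((((PySem.List.index? s (pvMinOf s)).getD 0 : Nat) : Int), pvMinOf s) := by
  induction s using List.reverseRecOn with
  | nil => simp at hs
  | append_singleton s₀ y ih =>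
    rcases eq_or_ne s₀ [] with rfl | h₀
    · simp [pvMinOf, PySem.List.enumerate_cons, PySem.List.enumerate_nil]
    · obtain ⟨x, tl, rfl⟩ := List.exists_cons_of_ne_nil h₀
      have e1 : PySem.List.enumerate ((x :: tl) ++ [y]) 0
          = PySem.List.enumerate (x :: tl) 0 ++ [(((x :: tl).length : Int), y)] := by
        rw [PySem.List.enumerate_append]
        simp [PySem.List.enumerate_cons, PySem.List.enumerate_nil]
      have hmin_le : ∀ z ∈ x :: tl, pvMinOf (x :: tl) ≤ z := by
        intro z hz
        have h := PySem.List.foldl_min_le tl x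
        rcases List.mem_cons.1 hz with rfl | hz
        · exact h.1
        · exact h.2 z hz
      have hmem : pvMinOf (x :: tl) ∈ x :: tl := by
        rcases PySem.List.foldl_min_mem tl x with h | h
        · rw [pvMinOf]; simp only [List.tail_cons, List.headI_cons]
          rw [h]; exact List.mem_cons_self
        · exact List.mem_cons_of_mem _ (by rw [pvMinOf]; simpa using h)
      have hminapp : pvMinOf ((x :: tl) ++ [y]) = min (pvMinOf (x :: tl)) y := by
        simp [pvMinOf, List.foldl_append]
      rw [e1, List.foldl_append]
      have hh : ((x :: tl) ++ [y]).headI = (x :: tl).headI := rfl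
      rw [hh, ih (by simp)]
      by_cases hy : y < pvMinOf (x :: tl)
      · have hnot : y ∉ x :: tl := fun hmem' => absurd (hmin_le y hmem') (not_le.2 hy)
        have hidx : PySem.List.index? ((x :: tl) ++ [y]) y = some (x :: tl).length :=
          PySem.List.index?_append_singleton_self (x :: tl) y hnot
        rw [hminapp, min_eq_right (le_of_lt hy)]
        simp only [PySem.List.index?_eq_idxOf?, List.cons_append] at hidx
        simp [hy, hidx]
      · have hidx : PySem.List.index? ((x :: tl) ++ [y]) (pvMinOf (x :: tl))
            = PySem.List.index? (x :: tl) (pvMinOf (x :: tl)) :=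
          PySem.List.index?_append_of_mem _ hmem
        rw [hminapp, min_eq_left (not_lt.1 hy)]
        simp only [PySem.List.index?_eq_idxOf?, List.cons_append] at hidx
        simp [hy, hidx]

-- properties of the first argmin
lemma pv_argmin_spec (L : List String) (h2 : 2 ≤ L.length) :
    pvArgmin L + 1 < L.length ∧
    (pvSums L).getD (pvArgmin L) 0 = pvMinOf (pvSums L) ∧
    (∀ s < pvArgmin L, (pvSums L).getD s 0 ≠ pvMinOf (pvSums L)) := by
  have hsne : pvSums L ≠ [] := by
    have := pv_sums_length L
    intro h; rw [h] at this; simp at this; omega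
  obtain ⟨k, hk⟩ : ∃ k, PySem.List.index? (pvSums L) (pvMinOf (pvSums L)) = some k :=
    Option.isSome_iff_exists.1
      ((PySem.List.index?_isSome_iff _ _).2 (pv_minOf_mem _ hsne))
  obtain ⟨hklt, hkval, hkfirst⟩ := PySem.List.getElem_of_index?_eq_some hk
  have hark : pvArgmin L = k := by rw [pvArgmin, hk]; rfl
  have hsl := pv_sums_length L
  refine ⟨by omega, ?_, ?_⟩
  · rw [hark, pv_getD_eq_getElem _ _ _ hklt, hkval]
  · intro sidx hs
    rw [hark] at hs
    rw [pv_getD_eq_getElem _ _ _ (by omega)]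
    exact hkfirst sidx hs

lemma pv_argmin_unique (L : List String) (h2 : 2 ≤ L.length) (r : Nat) (c : Int)
    (hr : r + 1 < L.length) (hv : (pvSums L).getD r 0 = c)
    (hmin : ∀ s, s + 1 < L.length → c ≤ (pvSums L).getD s 0)
    (hfirst : ∀ s < r, (pvSums L).getD s 0 ≠ c) :
    pvArgmin L = r := by
  have hsl := pv_sums_length L
  have hrl : r < (pvSums L).length := by omega
  have hcm : c ∈ pvSums L := by
    rw [← hv, pv_getD_eq_getElem _ _ _ hrl]
    exact List.getElem_mem hrl
  have hle : ∀ z ∈ pvSums L, c ≤ z := by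
    intro z hz
    obtain ⟨sidx, hs, rfl⟩ := List.mem_iff_getElem.1 hz
    rw [← pv_getD_eq_getElem _ _ 0 hs]
    exact hmin sidx (by omega)
  have hmc : pvMinOf (pvSums L) = c := pv_minOf_eq _ _ hcm hle
  rw [pvArgmin, hmc,
    pv_index?_eq_some_of _ _ r hrl (by rw [← pv_getD_eq_getElem _ _ 0 hrl]; exact hv)
      (fun j hj => by rw [← pv_getD_eq_getElem _ _ 0 (by omega)]; exact hfirst j hj)]
  rfl

-- A's scan returns the first argmin
lemma pv_scan_eq (L : List String) (h2 : 2 ≤ L.length) :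
    pvScan L = ((pvArgmin L : Int), pvMinOf (pvSums L)) := by
  have hsl := pv_sums_length L
  have hsne : pvSums L ≠ [] := by
    intro h; rw [h] at hsl; simp at hsl; omega
  have hcomb : ∀ k : Nat, k < (pvSums L).length →
      pvCombined L (k : Int) = PySem.List.pyGetD (pvSums L) (k : Int) 0 := by
    intro k hk
    have e2 : ((k : Int) + 1) = ((k + 1 : Nat) : Int) := by push_cast; ring
    rw [pvCombined, e2, PySem.List.pyGetD_natCast, PySem.List.pyGetD_natCast,
      PySem.List.pyGetD_natCast, pv_sums_getD L k (by omega)]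
  have hinit : pvCombined L 0 = (pvSums L).headI := by
    have h := hcomb 0 (by omega)
    rw [show ((0 : Nat) : Int) = (0 : Int) from rfl] at h
    rw [h, PySem.List.pyGetD_zero]
    obtain ⟨c, cs, hcons⟩ := List.exists_cons_of_ne_nil hsne
    rw [hcons]; rfl
  rw [pvScan]
  have hr : (L.length : Int) - 1 = PySem.List.len (pvSums L) := by
    simp only [PySem.List.len_eq]
    omega
  rw [hr, hinit]
  calc (PySem.List.pyRange 0 (PySem.List.len (pvSums L)) 1).foldl
          (fun st i => if pvCombined L i < st.2 then (i, pvCombined L i) else st)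
          (0, (pvSums L).headI)
      = (PySem.List.pyRange 0 (PySem.List.len (pvSums L)) 1).foldl
          (fun st i => if PySem.List.pyGetD (pvSums L) i 0 < st.2
            then (i, PySem.List.pyGetD (pvSums L) i 0) else st)
          (0, (pvSums L).headI) := by
        apply PySem.List.foldl_congr_mem
        intro acc x hx
        have hx' := (PySem.List.mem_pyRange_one).1 (by simpa using hx)
        lift x to ℕ using hx'.1 with k
        have hklt : k < (pvSums L).length := by
          exact_mod_cast hx'.2
        rw [hcomb k hklt]
    _ = (PySem.List.enumerate (pvSums L)).foldl
          (fun (st : Int × Int) p => if p.2 < st.2 then p else st) (0, (pvSums L).headI) := by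
        rw [PySem.List.enumerate_eq_map_pyRange (pvSums L) 0, List.foldl_map]
    _ = ((((PySem.List.index? (pvSums L) (pvMinOf (pvSums L))).getD 0 : Nat) : Int),
          pvMinOf (pvSums L)) :=
        pv_fold_argmin (pvSums L) hsne

-- one round of A, characterized
lemma pv_mergeA_eq (L : List String) (h2 : 2 ≤ L.length) :
    pvMergeA L = (L.set (pvArgmin L) (pvMergedStr L (pvArgmin L))).eraseIdx (pvArgmin L + 1) := by
  obtain ⟨hlt, _, _⟩ := pv_argmin_spec L h2
  rw [pvMergeA, pv_scan_eq L h2]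
  simp only
  have e2 : ((pvArgmin L : Int) + 1) = ((pvArgmin L + 1 : Nat) : Int) := by push_cast; ring
  rw [e2, PySem.List.pyGetD_natCast, PySem.List.pyGetD_natCast, PySem.List.pySetD_natCast]
  have hmerged : PySem.Str.strip (L.getD (pvArgmin L) "") ++ " " ++
      PySem.Str.strip (L.getD (pvArgmin L + 1) "") ++ "\n" = pvMergedStr L (pvArgmin L) := by
    rw [pvMergedStr]
  rw [hmerged]
  have hpoplen : pvArgmin L + 1 < (L.set (pvArgmin L) (pvMergedStr L (pvArgmin L))).length := by
    rw [List.length_set]; omega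
  rw [PySem.List.pop?_natCast _ _ hpoplen]
  rfl

lemma pv_loopA_stop (fuel : Nat) (L : List String) (t : Int) (h : ¬ ((L.length : Int) > t)) :
    pvLoopA fuel L t = L := by
  cases fuel with
  | zero => rfl
  | succ f => simp [pvLoopA, h]

-- ---------- the loop invariant of B ----------

structure PvInv (st : PvStB) (ids : List Nat) (L : List String) : Prop where
  hkey : st.key.length = st.text.length
  halive : st.alive.length = st.text.length
  hnxtl : st.nxt.length = st.text.length
  hprvl : st.prv.length = st.text.length
  hgenl : st.gen.length = st.text.length
  hlen : ids.length = L.length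
  hcount : st.count = L.length
  hinc : ids.Pairwise (· < ·)
  hboundv : ∀ x ∈ ids, x < st.text.length
  hne : ids ≠ []
  hhead : ids.getD 0 0 = 0
  hnxt_link : ∀ r, r + 1 < ids.length →
    st.nxt.getD (ids.getD r 0) none = some (ids.getD (r + 1) 0)
  hnxt_last : ∀ r, r + 1 = ids.length → st.nxt.getD (ids.getD r 0) none = none
  hprv_link : ∀ r, r + 1 < ids.length →
    st.prv.getD (ids.getD (r + 1) 0) none = some (ids.getD r 0)
  hprv_head : st.prv.getD (ids.getD 0 0) none = none
  halive_iff : ∀ i, st.alive.getD i false = true ↔ i ∈ ids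
  htext : ∀ r, r < ids.length → st.text.getD (ids.getD r 0) "" = L.getD r ""
  hkeyv : ∀ r, r < ids.length →
    st.key.getD (ids.getD r 0) "" = PySem.Str.strip (L.getD r "")
  hqsort : pvQSorted st.q
  hqmem : ∀ r, r + 1 < ids.length →
    (PySem.Str.len (PySem.Str.strip (L.getD r "")) +
       PySem.Str.len (PySem.Str.strip (L.getD (r + 1) "")),
     ids.getD r 0, st.gen.getD (ids.getD r 0) 0) ∈ st.q
  hqvalid : ∀ e ∈ st.q, st.alive.getD e.2.1 false = true → st.gen.getD e.2.1 0 = e.2.2 →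
    st.nxt.getD e.2.1 none ≠ none →
    ∃ r, r + 1 < ids.length ∧ e.2.1 = ids.getD r 0 ∧
      e.1 = PySem.Str.len (PySem.Str.strip (L.getD r "")) +
            PySem.Str.len (PySem.Str.strip (L.getD (r + 1) ""))
  hgenb : ∀ e ∈ st.q, e.2.2 ≤ st.gen.getD e.2.1 0

-- getD of a chain position is a member
lemma pv_getD_mem (ids : List Nat) (s : Nat) (hs : s < ids.length) : ids.getD s 0 ∈ ids := by
  rw [pv_getD_eq_getElem _ _ _ hs]
  exact List.getElem_mem hs

-- a stale pop preserves the invariant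
lemma pv_stale_step (st : PvStB) (ids : List Nat) (L : List String)
    (inv : PvInv st ids L) (e : Int × Nat × Nat) (rest : List (Int × Nat × Nat))
    (hq : st.q = e :: rest)
    (hstale : ¬ (st.alive.getD e.2.1 false = true ∧ st.gen.getD e.2.1 0 = e.2.2 ∧
                 st.nxt.getD e.2.1 none ≠ none)) :
    PvInv { st with q := rest } ids L := by
  refine ⟨inv.hkey, inv.halive, inv.hnxtl, inv.hprvl, inv.hgenl, inv.hlen, inv.hcount,
    inv.hinc, inv.hboundv, inv.hne, inv.hhead, inv.hnxt_link, inv.hnxt_last, inv.hprv_link,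
    inv.hprv_head, inv.halive_iff, inv.htext, inv.hkeyv, ?_, ?_, ?_, ?_⟩
  · have h := inv.hqsort
    rw [hq] at h
    exact (List.pairwise_cons.1 h).2
  · intro r hr
    have h := inv.hqmem r hr
    rw [hq] at h
    rcases List.mem_cons.1 h with heq | h
    · exfalso
      apply hstale
      rw [← heq]
      refine ⟨?_, rfl, ?_⟩
      · exact (inv.halive_iff _).2 (pv_getD_mem ids r (by omega))
      · rw [inv.hnxt_link r hr]
        simp
    · exact h
  · intro e' he' h1 h2 h3
    exact inv.hqvalid e' (by rw [hq]; exact List.mem_cons_of_mem _ he') h1 h2 h3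
  · intro e' he'
    exact inv.hgenb e' (by rw [hq]; exact List.mem_cons_of_mem _ he')

-- re-establishing the invariant after a merge, from pointwise descriptions of
-- the updated state
lemma pv_reassemble (st st' : PvStB) (ids : List Nat) (L : List String)
    (inv : PvInv st ids L) (r : Nat) (hr : r + 1 < ids.length)
    (c : Int) (g : Nat) (rest : List (Int × Nat × Nat))
    (hq : st.q = (c, ids.getD r 0, g) :: rest)
    (Hlens : st'.text.length = st.text.length ∧ st'.key.length = st.text.length ∧
             st'.alive.length = st.text.length ∧ st'.nxt.length = st.text.length ∧
             st'.prv.length = st.text.length ∧ st'.gen.length = st.text.length)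
    (Htext : ∀ x, st'.text.getD x "" =
      if x = ids.getD r 0 then pvMergedStr L r else st.text.getD x "")
    (Hkey : ∀ x, st'.key.getD x "" =
      if x = ids.getD r 0 then PySem.Str.strip (pvMergedStr L r) else st.key.getD x "")
    (Halive : ∀ x, st'.alive.getD x false =
      if x = ids.getD (r + 1) 0 then false else st.alive.getD x false)
    (Hnxt : ∀ x, st'.nxt.getD x none =
      if x = ids.getD r 0 then st.nxt.getD (ids.getD (r + 1) 0) none else st.nxt.getD x none)
    (Hprv : ∀ x, st'.prv.getD x none =
      if r + 2 < ids.length ∧ x = ids.getD (r + 2) 0 then some (ids.getD r 0)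
      else st.prv.getD x none)
    (Hgen : ∀ x, st'.gen.getD x 0 =
      if x = ids.getD r 0 then st.gen.getD x 0 + 1
      else if 1 ≤ r ∧ x = ids.getD (r - 1) 0 then st.gen.getD x 0 + 1
      else st.gen.getD x 0)
    (Hq : ∀ e, e ∈ st'.q ↔
      (r + 2 < ids.length ∧
        e = (PySem.Str.len (PySem.Str.strip (pvMergedStr L r)) +
               PySem.Str.len (st.key.getD (ids.getD (r + 2) 0) ""),
             ids.getD r 0, st.gen.getD (ids.getD r 0) 0 + 1)) ∨
      (1 ≤ r ∧
        e = (PySem.Str.len (st.key.getD (ids.getD (r - 1) 0) "") +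
               PySem.Str.len (PySem.Str.strip (pvMergedStr L r)),
             ids.getD (r - 1) 0, st.gen.getD (ids.getD (r - 1) 0) 0 + 1)) ∨
      e ∈ rest)
    (Hqs : pvQSorted st'.q)
    (Hcount : st'.count = st.count - 1) :
    PvInv st' (ids.eraseIdx (r + 1)) ((L.set r (pvMergedStr L r)).eraseIdx (r + 1)) := by
  have hlen := inv.hlen
  have hnd : ids.Nodup := inv.hinc.imp (fun h => Nat.ne_of_lt h)
  have hidlt : ∀ a b, a < b → b < ids.length → ids.getD a 0 < ids.getD b 0 :=
    pv_pairwise_getD_lt ids inv.hinc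
  have hidne : ∀ a b, a < ids.length → b < ids.length → a ≠ b →
      ids.getD a 0 ≠ ids.getD b 0 := by
    intro a b ha hb hab
    rcases Nat.lt_or_ge a b with h | h
    · exact Nat.ne_of_lt (hidlt a b h hb)
    · exact (Nat.ne_of_lt (hidlt b a (by omega) ha)).symm
  have hL'len : ((L.set r (pvMergedStr L r)).eraseIdx (r + 1)).length = L.length - 1 := by
    rw [List.length_eraseIdx, List.length_set]
    split_ifs <;> omega
  have hids'len : (ids.eraseIdx (r + 1)).length = ids.length - 1 := by
    rw [List.length_eraseIdx]
    split_ifs <;> omega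
  have HI : ∀ s, s + 1 < ids.length →
      (ids.eraseIdx (r + 1)).getD s 0 = if s < r + 1 then ids.getD s 0 else ids.getD (s + 1) 0 :=
    fun s hs => pv_getD_eraseIdx ids (r + 1) s 0 hs
  have HL : ∀ s, s + 1 < L.length →
      ((L.set r (pvMergedStr L r)).eraseIdx (r + 1)).getD s "" =
        if s < r then L.getD s "" else if s = r then pvMergedStr L r else L.getD (s + 1) "" := by
    intro s hs
    rw [pv_getD_eraseIdx _ _ _ _ (by rw [List.length_set]; omega)]
    by_cases h1 : s < r + 1
    · rw [if_pos h1, pv_getD_set]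
      by_cases h2 : s < r
      · rw [if_neg (by omega), if_pos h2]
      · rw [if_pos (by omega), if_neg (by omega), if_pos (by omega)]
    · rw [if_neg h1, pv_getD_set, if_neg (by omega), if_neg (by omega), if_neg (by omega)]
  refine ⟨?_, ?_, ?_, ?_, ?_, ?_, ?_, ?_, ?_, ?_, ?_, ?_, ?_, ?_, ?_, ?_, ?_, ?_, ?_, ?_, ?_, ?_⟩
  · rw [Hlens.2.1, Hlens.1]
  · rw [Hlens.2.2.1, Hlens.1]
  · rw [Hlens.2.2.2.1, Hlens.1]
  · rw [Hlens.2.2.2.2.1, Hlens.1]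
  · rw [Hlens.2.2.2.2.2, Hlens.1]
  · rw [hids'len, hL'len]; omega
  · rw [Hcount, hL'len, inv.hcount]
  · exact inv.hinc.sublist (List.eraseIdx_sublist ids (r + 1))
  · intro x hx
    rw [Hlens.1]
    exact inv.hboundv x ((List.eraseIdx_sublist ids (r + 1)).subset hx)
  · intro h
    have h2 := hids'len
    rw [h] at h2
    simp at h2
    omega
  · rw [HI 0 (by omega), if_pos (show 0 < r + 1 by omega)]
    exact inv.hhead
  · -- hnxt_link
    intro s hs
    rw [hids'len] at hs
    rw [HI s (by omega), HI (s + 1) (by omega)]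
    by_cases h1 : s < r
    · rw [if_pos (show s < r + 1 by omega), if_pos (show s + 1 < r + 1 by omega), Hnxt,
        if_neg (hidne s r (by omega) (by omega) (by omega)), inv.hnxt_link s (by omega)]
    · by_cases h2 : s = r
      · rw [if_pos (show s < r + 1 by omega), if_neg (show ¬ (s + 1 < r + 1) by omega), Hnxt,
          if_pos (show ids.getD s 0 = ids.getD r 0 by rw [h2]), h2,
          inv.hnxt_link (r + 1) (by omega)]
      · rw [if_neg (show ¬ (s < r + 1) by omega), if_neg (show ¬ (s + 1 < r + 1) by omega),
          Hnxt, if_neg (hidne (s + 1) r (by omega) (by omega) (by omega)),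
          inv.hnxt_link (s + 1) (by omega)]
  · -- hnxt_last
    intro s hs
    rw [hids'len] at hs
    rw [HI s (by omega)]
    by_cases h1 : s < r + 1
    · have h2 : s = r := by omega
      rw [if_pos (show s < r + 1 by omega), Hnxt,
        if_pos (show ids.getD s 0 = ids.getD r 0 by rw [h2]),
        inv.hnxt_last (r + 1) (by omega)]
    · rw [if_neg (show ¬ (s < r + 1) by omega), Hnxt,
        if_neg (hidne (s + 1) r (by omega) (by omega) (by omega)),
        inv.hnxt_last (s + 1) (by omega)]
  · -- hprv_link
    intro s hs
    rw [hids'len] at hs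
    rw [HI s (by omega), HI (s + 1) (by omega)]
    by_cases h1 : s < r
    · rw [if_pos (show s < r + 1 by omega), if_pos (show s + 1 < r + 1 by omega), Hprv,
        if_neg (fun h => hidne (s + 1) (r + 2) (by omega) h.1 (by omega) h.2),
        inv.hprv_link s (by omega)]
    · by_cases h2 : s = r
      · rw [if_pos (show s < r + 1 by omega), if_neg (show ¬ (s + 1 < r + 1) by omega), Hprv,
          if_pos (show r + 2 < ids.length ∧ ids.getD (s + 1 + 1) 0 = ids.getD (r + 2) 0 from
            ⟨by omega, by rw [h2]⟩), h2]
      · rw [if_neg (show ¬ (s < r + 1) by omega), if_neg (show ¬ (s + 1 < r + 1) by omega),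
          Hprv,
          if_neg (fun h => hidne (s + 1 + 1) (r + 2) (by omega) h.1 (by omega) h.2),
          inv.hprv_link (s + 1) (by omega)]
  · -- hprv_head
    rw [HI 0 (by omega), if_pos (show 0 < r + 1 by omega), Hprv,
      if_neg (fun h => hidne 0 (r + 2) (by omega) h.1 (by omega) h.2)]
    exact inv.hprv_head
  · -- halive_iff
    intro x
    rw [Halive]
    have hmem' : x ∈ ids.eraseIdx (r + 1) ↔ x ∈ ids ∧ x ≠ ids.getD (r + 1) 0 := by
      rw [pv_getD_eq_getElem _ _ _ (by omega : r + 1 < ids.length)]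
      exact pv_mem_eraseIdx_nodup ids hnd (r + 1) (by omega) x
    by_cases hx : x = ids.getD (r + 1) 0
    · rw [if_pos hx]
      constructor
      · intro h; exact absurd h (by simp)
      · intro h
        exact absurd (hmem'.1 h).2 (by simp [hx])
    · rw [if_neg hx, inv.halive_iff, hmem']
      constructor
      · intro h; exact ⟨h, hx⟩
      · intro h; exact h.1
  · -- htext
    intro s hs
    rw [hids'len] at hs
    rw [HI s (by omega), HL s (by omega)]
    by_cases h1 : s < r
    · rw [if_pos (show s < r + 1 by omega), Htext,
        if_neg (hidne s r (by omega) (by omega) (by omega)),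
        if_pos (show s < r by omega), inv.htext s (by omega)]
    · by_cases h2 : s = r
      · rw [if_pos (show s < r + 1 by omega), Htext,
          if_pos (show ids.getD s 0 = ids.getD r 0 by rw [h2]),
          if_neg (show ¬ (s < r) by omega), if_pos h2]
      · rw [if_neg (show ¬ (s < r + 1) by omega), Htext,
          if_neg (hidne (s + 1) r (by omega) (by omega) (by omega)),
          if_neg (show ¬ (s < r) by omega), if_neg h2, inv.htext (s + 1) (by omega)]
  · -- hkeyv
    intro s hs
    rw [hids'len] at hs
    rw [HI s (by omega), HL s (by omega)]
    by_cases h1 : s < r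
    · rw [if_pos (show s < r + 1 by omega), Hkey,
        if_neg (hidne s r (by omega) (by omega) (by omega)),
        if_pos (show s < r by omega), inv.hkeyv s (by omega)]
    · by_cases h2 : s = r
      · rw [if_pos (show s < r + 1 by omega), Hkey,
          if_pos (show ids.getD s 0 = ids.getD r 0 by rw [h2]),
          if_neg (show ¬ (s < r) by omega), if_pos h2]
      · rw [if_neg (show ¬ (s < r + 1) by omega), Hkey,
          if_neg (hidne (s + 1) r (by omega) (by omega) (by omega)),
          if_neg (show ¬ (s < r) by omega), if_neg h2, inv.hkeyv (s + 1) (by omega)]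
  · exact Hqs
  · -- hqmem
    intro s hs
    rw [hids'len] at hs
    rw [HI s (by omega), HL s (by omega), HL (s + 1) (by omega)]
    by_cases h1 : s + 1 < r
    · rw [if_pos (show s < r + 1 by omega), if_pos (show s < r by omega),
        if_pos (show s + 1 < r by omega), Hgen,
        if_neg (hidne s r (by omega) (by omega) (by omega)),
        if_neg (fun h => hidne s (r - 1) (by omega) (by omega) (by omega) h.2), Hq]
      right; right
      have h := inv.hqmem s (by omega)
      rw [hq] at h
      rcases List.mem_cons.1 h with heq | h
      · exfalso
        have h5 : ids.getD s 0 = ids.getD r 0 := congrArg (fun e => e.2.1) heq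
        exact hidne s r (by omega) (by omega) (by omega) h5
      · exact h
    · by_cases h2 : s + 1 = r
      · rw [if_pos (show s < r + 1 by omega), if_pos (show s < r by omega),
          if_neg (show ¬ (s + 1 < r) by omega), if_pos (show s + 1 = r by omega), Hgen,
          if_neg (hidne s r (by omega) (by omega) (by omega)),
          if_pos (show 1 ≤ r ∧ ids.getD s 0 = ids.getD (r - 1) 0 by
            exact ⟨by omega, by rw [show r - 1 = s by omega]⟩), Hq]
        right; left
        refine ⟨by omega, ?_⟩
        rw [show r - 1 = s by omega, inv.hkeyv s (by omega)]
      · by_cases h3 : s = r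
        · rw [if_pos (show s < r + 1 by omega), if_neg (show ¬ (s < r) by omega),
            if_pos h3, if_neg (show ¬ (s + 1 < r) by omega),
            if_neg (show ¬ (s + 1 = r) by omega), Hgen,
            if_pos (show ids.getD s 0 = ids.getD r 0 by rw [h3]), Hq]
          left
          refine ⟨by omega, ?_⟩
          rw [h3, inv.hkeyv (r + 2) (by omega), show r + 1 + 1 = r + 2 by omega]
        · rw [if_neg (show ¬ (s < r + 1) by omega), if_neg (show ¬ (s < r) by omega),
            if_neg h3, if_neg (show ¬ (s + 1 < r) by omega),
            if_neg (show ¬ (s + 1 = r) by omega), Hgen,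
            if_neg (hidne (s + 1) r (by omega) (by omega) (by omega)),
            if_neg (fun h => hidne (s + 1) (r - 1) (by omega) (by omega) (by omega) h.2), Hq]
          right; right
          have h := inv.hqmem (s + 1) (by omega)
          rw [hq] at h
          rcases List.mem_cons.1 h with heq | h
          · exfalso
            have h5 : ids.getD (s + 1) 0 = ids.getD r 0 := congrArg (fun e => e.2.1) heq
            exact hidne (s + 1) r (by omega) (by omega) (by omega) h5
          · exact h
  · -- hqvalid
    intro e he halv' hgen' hnxt'
    rcases (Hq e).1 he with ⟨hrk, rfl⟩ | ⟨hrp, rfl⟩ | he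
    · refine ⟨r, by omega, ?_, ?_⟩
      · rw [HI r (by omega), if_pos (show r < r + 1 by omega)]
      · rw [HL r (by omega), HL (r + 1) (by omega), if_neg (show ¬ (r < r) by omega),
          if_pos rfl, if_neg (show ¬ (r + 1 < r) by omega),
          if_neg (show ¬ (r + 1 = r) by omega), inv.hkeyv (r + 1 + 1) (by omega),
          show r + 1 + 1 = r + 2 by omega]
    · refine ⟨r - 1, by omega, ?_, ?_⟩
      · rw [HI (r - 1) (by omega), if_pos (show r - 1 < r + 1 by omega)]
      · rw [HL (r - 1) (by omega), HL (r - 1 + 1) (by omega),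
          if_pos (show r - 1 < r by omega), show r - 1 + 1 = r by omega,
          if_neg (show ¬ (r < r) by omega), if_pos rfl, inv.hkeyv (r - 1) (by omega)]
    · have hei : e.2.1 ≠ ids.getD (r + 1) 0 := by
        intro hx
        rw [Halive, if_pos hx] at halv'
        exact absurd halv' (by simp)
      have heq : e ∈ st.q := by rw [hq]; exact List.mem_cons_of_mem _ he
      have hgb := inv.hgenb e heq
      have hei2 : e.2.1 ≠ ids.getD r 0 := by
        intro hx
        rw [Hgen, if_pos hx] at hgen'
        omega
      have hei3 : ¬ (1 ≤ r ∧ e.2.1 = ids.getD (r - 1) 0) := by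
        rintro ⟨hh1, hh2⟩
        rw [Hgen, if_neg hei2, if_pos ⟨hh1, hh2⟩] at hgen'
        omega
      rw [Halive, if_neg hei] at halv'
      rw [Hgen, if_neg hei2, if_neg hei3] at hgen'
      rw [Hnxt, if_neg hei2] at hnxt'
      obtain ⟨s, hs, hnode, hcost⟩ := inv.hqvalid e heq halv' hgen' hnxt'
      have hsr : s ≠ r := by
        intro hx; subst hx; exact hei2 hnode
      have hsr1 : s ≠ r + 1 := by
        intro hx; subst hx; exact hei hnode
      rcases Nat.lt_or_ge s r with h1 | h1
      · have hsr2 : s ≠ r - 1 := by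
          intro hx
          exact hei3 ⟨by omega, by rw [← hx]; exact hnode⟩
        refine ⟨s, by omega, ?_, ?_⟩
        · rw [HI s (by omega), if_pos (show s < r + 1 by omega)]; exact hnode
        · rw [HL s (by omega), HL (s + 1) (by omega), if_pos (show s < r by omega),
            if_pos (show s + 1 < r by omega)]
          exact hcost
      · have h2 : r + 1 < s := by omega
        refine ⟨s - 1, by omega, ?_, ?_⟩
        · rw [HI (s - 1) (by omega), if_neg (show ¬ (s - 1 < r + 1) by omega),
            show s - 1 + 1 = s by omega]
          exact hnode
        · rw [HL (s - 1) (by omega), HL (s - 1 + 1) (by omega),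
            if_neg (show ¬ (s - 1 < r) by omega), if_neg (show ¬ (s - 1 = r) by omega),
            show s - 1 + 1 = s by omega, if_neg (show ¬ (s < r) by omega),
            if_neg (show ¬ (s = r) by omega)]
          exact hcost
  · -- hgenb
    intro e he
    rcases (Hq e).1 he with ⟨hrk, rfl⟩ | ⟨hrp, rfl⟩ | he
    · simp only
      rw [Hgen, if_pos rfl]
    · simp only
      rw [Hgen, if_neg (hidne (r - 1) r (by omega) (by omega) (by omega)),
        if_pos ⟨hrp, rfl⟩]
    · have h6 := inv.hgenb e (by rw [hq]; exact List.mem_cons_of_mem _ he)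
      rw [Hgen]
      split_ifs <;> omega

lemma pv_getD_set_iff {α : Type} (l : List α) (i : Nat) (v d : α) (hi : i < l.length) (x : Nat) :
    (l.set i v).getD x d = if x = i then v else l.getD x d := by
  rw [pv_getD_set]
  by_cases hx : x = i
  · rw [if_pos ⟨hx.symm, hi⟩, if_pos hx]
  · rw [if_neg (fun h => hx h.1.symm), if_neg hx]

-- one merge: the popped valid entry is exactly A's argmin pair, and the merged
-- state satisfies the invariant for the merged line list
set_option maxHeartbeats 1000000 in
lemma pv_merge_inv (st : PvStB) (ids : List Nat) (L : List String)
    (inv : PvInv st ids L) (c : Int) (i g : Nat) (rest : List (Int × Nat × Nat))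
    (hq : st.q = (c, i, g) :: rest) (j : Nat)
    (hj : st.nxt.getD i none = some j)
    (halv : st.alive.getD i false = true) (hgg : st.gen.getD i 0 = g) :
    ∃ r, pvArgmin L = r ∧ r + 1 < ids.length ∧
      PvInv (pvMergeBState st i j rest) (ids.eraseIdx (r + 1))
        ((L.set r (pvMergedStr L r)).eraseIdx (r + 1)) ∧
      (pvMergeBState st i j rest).q.length ≤ rest.length + 2 ∧
      (pvMergeBState st i j rest).count = st.count - 1 := by
  have hlen := inv.hlen
  have hidlt := pv_pairwise_getD_lt ids inv.hinc
  have hidne : ∀ a b, a < ids.length → b < ids.length → a ≠ b →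
      ids.getD a 0 ≠ ids.getD b 0 := by
    intro a b ha hb hab
    rcases Nat.lt_or_ge a b with h | h
    · exact Nat.ne_of_lt (hidlt a b h hb)
    · exact (Nat.ne_of_lt (hidlt b a (by omega) ha)).symm
  have hmem0 : (c, i, g) ∈ st.q := by rw [hq]; exact List.mem_cons_self
  obtain ⟨r, hr, hir, hcost⟩ := inv.hqvalid (c, i, g) hmem0 halv hgg (by rw [hj]; simp)
  simp only at hir hcost
  subst hir
  have hj2 := inv.hnxt_link r hr
  rw [hj] at hj2
  have hj' : j = ids.getD (r + 1) 0 := Option.some.inj hj2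
  subst hj'
  have h2L : 2 ≤ L.length := by omega
  have hqs := inv.hqsort
  rw [hq] at hqs
  obtain ⟨hhead, hqrest⟩ := List.pairwise_cons.1 hqs
  have hargmin : pvArgmin L = r := by
    apply pv_argmin_unique L h2L r c (by omega)
    · rw [pv_sums_getD L r (by omega)]; omega
    · intro s hs
      rw [pv_sums_getD L s (by omega)]
      have htup := inv.hqmem s (by omega)
      rw [hq] at htup
      rcases List.mem_cons.1 htup with heq | hmem
      · have h5 := congrArg (fun e => e.1) heq
        simp only at h5
        omega
      · have h5 := pv_cost_le_of_not_lt (hhead _ hmem)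
        simp only at h5
        omega
    · intro s hs hc
      rw [pv_sums_getD L s (by omega)] at hc
      have htup := inv.hqmem s (by omega)
      rw [hq] at htup
      rcases List.mem_cons.1 htup with heq | hmem
      · have h5 := congrArg (fun e => e.2.1) heq
        simp only at h5
        exact hidne s r (by omega) (by omega) (by omega) h5
      · have hlt := pvEntLt_of_same_cost
          (c := c) (i := ids.getD r 0) (i' := ids.getD s 0)
          (g := g) (g' := st.gen.getD (ids.getD s 0) 0)
          (hidlt s r (by omega) (by omega))
        have hf := hhead _ hmem
        rw [show (PySem.Str.len (PySem.Str.strip (L.getD s "")) +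
            PySem.Str.len (PySem.Str.strip (L.getD (s + 1) ""))) = c by omega] at hf
        rw [hf] at hlt
        exact Bool.false_ne_true hlt
  have hin : ids.getD r 0 < st.text.length := inv.hboundv _ (pv_getD_mem ids r (by omega))
  have hjn : ids.getD (r + 1) 0 < st.text.length :=
    inv.hboundv _ (pv_getD_mem ids (r + 1) (by omega))
  have hinK : ids.getD r 0 < st.key.length := by rw [inv.hkey]; exact hin
  have hjnA : ids.getD (r + 1) 0 < st.alive.length := by rw [inv.halive]; exact hjn
  have hinN : ids.getD r 0 < st.nxt.length := by rw [inv.hnxtl]; exact hin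
  have hinG : ids.getD r 0 < st.gen.length := by rw [inv.hgenl]; exact hin
  have htxt : st.key.getD (ids.getD r 0) "" ++ " " ++
      st.key.getD (ids.getD (r + 1) 0) "" ++ "\n" = pvMergedStr L r := by
    rw [inv.hkeyv r (by omega), inv.hkeyv (r + 1) (by omega)]; rfl
  have hk1 : (st.key.set (ids.getD r 0) (PySem.Str.strip (pvMergedStr L r))).getD
      (ids.getD r 0) "" = PySem.Str.strip (pvMergedStr L r) := by
    rw [pv_getD_set_iff _ _ _ _ hinK, if_pos rfl]
  have hg1 : (st.gen.set (ids.getD r 0) (st.gen.getD (ids.getD r 0) 0 + 1)).getD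
      (ids.getD r 0) 0 = st.gen.getD (ids.getD r 0) 0 + 1 := by
    rw [pv_getD_set_iff _ _ _ _ hinG, if_pos rfl]
  refine ⟨r, hargmin, hr, ?_⟩
  rcases hcase : st.nxt.getD (ids.getD (r + 1) 0) none with _ | k'
  · -- no right neighbour: r is the last-but-one position
    have hr2 : ¬ (r + 2 < ids.length) := by
      intro h
      have h2 := inv.hnxt_link (r + 1) h
      rw [hcase] at h2
      simp at h2
    rcases Nat.lt_or_ge r 1 with hr0' | hr1
    · -- r = 0, no left neighbour either
      have hr0 : r = 0 := by omega
      have hpi0 : st.prv.getD (ids.getD r 0) none = none := by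
        rw [hr0]; exact inv.hprv_head
      have hstate : pvMergeBState st (ids.getD r 0) (ids.getD (r + 1) 0) rest =
          { text := st.text.set (ids.getD r 0) (pvMergedStr L r),
            key := st.key.set (ids.getD r 0) (PySem.Str.strip (pvMergedStr L r)),
            alive := st.alive.set (ids.getD (r + 1) 0) false,
            nxt := st.nxt.set (ids.getD r 0) none,
            prv := st.prv,
            gen := st.gen.set (ids.getD r 0) (st.gen.getD (ids.getD r 0) 0 + 1),
            q := rest,
            count := st.count - 1 } := by
        simp only [pvMergeBState, hcase, htxt, hpi0]
      refine ⟨?_, ?_, ?_⟩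
      · apply pv_reassemble st _ ids L inv r hr c g rest hq
        · rw [hstate]
          exact ⟨by simp, by simp [inv.hkey], by simp [inv.halive], by simp [inv.hnxtl],
            by simp [inv.hprvl], by simp [inv.hgenl]⟩
        · intro x; rw [hstate]; exact pv_getD_set_iff _ _ _ _ hin x
        · intro x; rw [hstate]; exact pv_getD_set_iff _ _ _ _ hinK x
        · intro x; rw [hstate]; exact pv_getD_set_iff _ _ _ _ hjnA x
        · intro x; rw [hstate, hcase]; exact pv_getD_set_iff _ _ _ _ hinN x
        · intro x; rw [hstate, if_neg (fun h => hr2 h.1)]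
        · intro x
          rw [hstate, pv_getD_set_iff _ _ _ _ hinG x]
          by_cases hx1 : x = ids.getD r 0
          · rw [if_pos hx1, if_pos hx1, hx1]
          · rw [if_neg hx1, if_neg hx1, if_neg (fun h => absurd h.1 (by omega))]
        · intro e
          rw [hstate]
          constructor
          · intro h
            exact Or.inr (Or.inr h)
          · rintro (⟨hh, _⟩ | ⟨hh, _⟩ | h)
            · exact absurd hh hr2
            · exact absurd hh (by omega)
            · exact h
        · rw [hstate]; exact hqrest
        · rw [hstate]
      · rw [hstate]; dsimp only; omega
      · rw [hstate]
    · -- r ≥ 1: refresh the left-neighbour entry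
      have hpn : ids.getD (r - 1) 0 < st.text.length :=
        inv.hboundv _ (pv_getD_mem ids (r - 1) (by omega))
      have hpnG : ids.getD (r - 1) 0 < st.gen.length := by rw [inv.hgenl]; exact hpn
      have hpi1 : st.prv.getD (ids.getD r 0) none = some (ids.getD (r - 1) 0) := by
        have h := inv.hprv_link (r - 1) (by omega)
        rw [show r - 1 + 1 = r by omega] at h
        exact h
      have hk3 : (st.key.set (ids.getD r 0) (PySem.Str.strip (pvMergedStr L r))).getD
          (ids.getD (r - 1) 0) "" = st.key.getD (ids.getD (r - 1) 0) "" := by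
        rw [pv_getD_set_iff _ _ _ _ hinK,
          if_neg (hidne (r - 1) r (by omega) (by omega) (by omega))]
      have hg2 : (st.gen.set (ids.getD r 0) (st.gen.getD (ids.getD r 0) 0 + 1)).getD
          (ids.getD (r - 1) 0) 0 = st.gen.getD (ids.getD (r - 1) 0) 0 := by
        rw [pv_getD_set_iff _ _ _ _ hinG,
          if_neg (hidne (r - 1) r (by omega) (by omega) (by omega))]
      have hstate : pvMergeBState st (ids.getD r 0) (ids.getD (r + 1) 0) rest =
          { text := st.text.set (ids.getD r 0) (pvMergedStr L r),
            key := st.key.set (ids.getD r 0) (PySem.Str.strip (pvMergedStr L r)),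
            alive := st.alive.set (ids.getD (r + 1) 0) false,
            nxt := st.nxt.set (ids.getD r 0) none,
            prv := st.prv,
            gen := (st.gen.set (ids.getD r 0) (st.gen.getD (ids.getD r 0) 0 + 1)).set
              (ids.getD (r - 1) 0) (st.gen.getD (ids.getD (r - 1) 0) 0 + 1),
            q := pvPush rest
              (PySem.Str.len (st.key.getD (ids.getD (r - 1) 0) "") +
                 PySem.Str.len (PySem.Str.strip (pvMergedStr L r)),
               ids.getD (r - 1) 0, st.gen.getD (ids.getD (r - 1) 0) 0 + 1),
            count := st.count - 1 } := by
        simp only [pvMergeBState, hcase, htxt, hpi1, hk1, hk3, hg2]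
      have hglen : ids.getD (r - 1) 0 <
          (st.gen.set (ids.getD r 0) (st.gen.getD (ids.getD r 0) 0 + 1)).length := by
        rw [List.length_set]; exact hpnG
      refine ⟨?_, ?_, ?_⟩
      · apply pv_reassemble st _ ids L inv r hr c g rest hq
        · rw [hstate]
          exact ⟨by simp, by simp [inv.hkey], by simp [inv.halive], by simp [inv.hnxtl],
            by simp [inv.hprvl], by simp [inv.hgenl]⟩
        · intro x; rw [hstate]; exact pv_getD_set_iff _ _ _ _ hin x
        · intro x; rw [hstate]; exact pv_getD_set_iff _ _ _ _ hinK x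
        · intro x; rw [hstate]; exact pv_getD_set_iff _ _ _ _ hjnA x
        · intro x; rw [hstate, hcase]; exact pv_getD_set_iff _ _ _ _ hinN x
        · intro x; rw [hstate, if_neg (fun h => hr2 h.1)]
        · intro x
          rw [hstate, pv_getD_set_iff _ _ _ _ hglen x, pv_getD_set_iff _ _ _ _ hinG x]
          by_cases hx1 : x = ids.getD r 0
          · rw [if_neg (show ¬ x = ids.getD (r - 1) 0 by
                rw [hx1]; exact hidne r (r - 1) (by omega) (by omega) (by omega)),
              if_pos hx1, if_pos hx1, hx1]
          · by_cases hx2 : x = ids.getD (r - 1) 0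
            · rw [if_pos hx2, if_neg hx1, if_pos ⟨hr1, hx2⟩, hx2]
            · rw [if_neg hx2, if_neg hx1, if_neg hx1, if_neg (fun h => hx2 h.2)]
        · intro e
          rw [hstate, pv_mem_push]
          constructor
          · rintro (rfl | h)
            · exact Or.inr (Or.inl ⟨hr1, rfl⟩)
            · exact Or.inr (Or.inr h)
          · rintro (⟨hh, _⟩ | ⟨_, rfl⟩ | h)
            · exact absurd hh hr2
            · exact Or.inl rfl
            · exact Or.inr h
        · rw [hstate]; exact pv_push_sorted _ _ hqrest
        · rw [hstate]
      · rw [hstate]; dsimp only; rw [pv_push_length]; omega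
      · rw [hstate]
  · -- there is a right neighbour k' = ids[r+2]
    have hr2 : r + 2 < ids.length := by
      by_contra h
      have h2 := inv.hnxt_last (r + 1) (by omega)
      rw [hcase] at h2
      simp at h2
    have hk'eq : k' = ids.getD (r + 2) 0 := by
      have h2 := inv.hnxt_link (r + 1) hr2
      exact Option.some.inj (hcase.symm.trans h2)
    subst hk'eq
    have hkn : ids.getD (r + 2) 0 < st.text.length :=
      inv.hboundv _ (pv_getD_mem ids (r + 2) (by omega))
    have hknP : ids.getD (r + 2) 0 < st.prv.length := by rw [inv.hprvl]; exact hkn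
    have hk2 : (st.key.set (ids.getD r 0) (PySem.Str.strip (pvMergedStr L r))).getD
        (ids.getD (r + 2) 0) "" = st.key.getD (ids.getD (r + 2) 0) "" := by
      rw [pv_getD_set_iff _ _ _ _ hinK,
        if_neg (hidne (r + 2) r (by omega) (by omega) (by omega))]
    have hpr2 : (st.prv.set (ids.getD (r + 2) 0) (some (ids.getD r 0))).getD
        (ids.getD r 0) none = st.prv.getD (ids.getD r 0) none := by
      rw [pv_getD_set_iff _ _ _ _ hknP,
        if_neg (hidne r (r + 2) (by omega) (by omega) (by omega))]
    rcases Nat.lt_or_ge r 1 with hr0' | hr1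
    · -- r = 0: only the right entry is refreshed
      have hr0 : r = 0 := by omega
      have hpi0 : st.prv.getD (ids.getD r 0) none = none := by
        rw [hr0]; exact inv.hprv_head
      have hstate : pvMergeBState st (ids.getD r 0) (ids.getD (r + 1) 0) rest =
          { text := st.text.set (ids.getD r 0) (pvMergedStr L r),
            key := st.key.set (ids.getD r 0) (PySem.Str.strip (pvMergedStr L r)),
            alive := st.alive.set (ids.getD (r + 1) 0) false,
            nxt := st.nxt.set (ids.getD r 0) (some (ids.getD (r + 2) 0)),
            prv := st.prv.set (ids.getD (r + 2) 0) (some (ids.getD r 0)),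
            gen := st.gen.set (ids.getD r 0) (st.gen.getD (ids.getD r 0) 0 + 1),
            q := pvPush rest
              (PySem.Str.len (PySem.Str.strip (pvMergedStr L r)) +
                 PySem.Str.len (st.key.getD (ids.getD (r + 2) 0) ""),
               ids.getD r 0, st.gen.getD (ids.getD r 0) 0 + 1),
            count := st.count - 1 } := by
        simp only [pvMergeBState, hcase, htxt, hpr2, hpi0, hk1, hk2, hg1]
      refine ⟨?_, ?_, ?_⟩
      · apply pv_reassemble st _ ids L inv r hr c g rest hq
        · rw [hstate]
          exact ⟨by simp, by simp [inv.hkey], by simp [inv.halive], by simp [inv.hnxtl],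
            by simp [inv.hprvl], by simp [inv.hgenl]⟩
        · intro x; rw [hstate]; exact pv_getD_set_iff _ _ _ _ hin x
        · intro x; rw [hstate]; exact pv_getD_set_iff _ _ _ _ hinK x
        · intro x; rw [hstate]; exact pv_getD_set_iff _ _ _ _ hjnA x
        · intro x; rw [hstate, hcase]; exact pv_getD_set_iff _ _ _ _ hinN x
        · intro x
          rw [hstate, pv_getD_set_iff _ _ _ _ hknP x]
          by_cases hx : x = ids.getD (r + 2) 0
          · rw [if_pos hx, if_pos ⟨hr2, hx⟩]
          · rw [if_neg hx, if_neg (fun h => hx h.2)]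
        · intro x
          rw [hstate, pv_getD_set_iff _ _ _ _ hinG x]
          by_cases hx1 : x = ids.getD r 0
          · rw [if_pos hx1, if_pos hx1, hx1]
          · rw [if_neg hx1, if_neg hx1, if_neg (fun h => absurd h.1 (by omega))]
        · intro e
          rw [hstate, pv_mem_push]
          constructor
          · rintro (rfl | h)
            · exact Or.inl ⟨hr2, rfl⟩
            · exact Or.inr (Or.inr h)
          · rintro (⟨_, rfl⟩ | ⟨hh, _⟩ | h)
            · exact Or.inl rfl
            · exact absurd hh (by omega)
            · exact Or.inr h
        · rw [hstate]; exact pv_push_sorted _ _ hqrest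
        · rw [hstate]
      · rw [hstate]; dsimp only; rw [pv_push_length]; omega
      · rw [hstate]
    · -- r ≥ 1: both neighbouring entries are refreshed
      have hpn : ids.getD (r - 1) 0 < st.text.length :=
        inv.hboundv _ (pv_getD_mem ids (r - 1) (by omega))
      have hpnG : ids.getD (r - 1) 0 < st.gen.length := by rw [inv.hgenl]; exact hpn
      have hpi1 : st.prv.getD (ids.getD r 0) none = some (ids.getD (r - 1) 0) := by
        have h := inv.hprv_link (r - 1) (by omega)
        rw [show r - 1 + 1 = r by omega] at h
        exact h
      have hk3 : (st.key.set (ids.getD r 0) (PySem.Str.strip (pvMergedStr L r))).getD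
          (ids.getD (r - 1) 0) "" = st.key.getD (ids.getD (r - 1) 0) "" := by
        rw [pv_getD_set_iff _ _ _ _ hinK,
          if_neg (hidne (r - 1) r (by omega) (by omega) (by omega))]
      have hg2 : (st.gen.set (ids.getD r 0) (st.gen.getD (ids.getD r 0) 0 + 1)).getD
          (ids.getD (r - 1) 0) 0 = st.gen.getD (ids.getD (r - 1) 0) 0 := by
        rw [pv_getD_set_iff _ _ _ _ hinG,
          if_neg (hidne (r - 1) r (by omega) (by omega) (by omega))]
      have hstate : pvMergeBState st (ids.getD r 0) (ids.getD (r + 1) 0) rest =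
          { text := st.text.set (ids.getD r 0) (pvMergedStr L r),
            key := st.key.set (ids.getD r 0) (PySem.Str.strip (pvMergedStr L r)),
            alive := st.alive.set (ids.getD (r + 1) 0) false,
            nxt := st.nxt.set (ids.getD r 0) (some (ids.getD (r + 2) 0)),
            prv := st.prv.set (ids.getD (r + 2) 0) (some (ids.getD r 0)),
            gen := (st.gen.set (ids.getD r 0) (st.gen.getD (ids.getD r 0) 0 + 1)).set
              (ids.getD (r - 1) 0) (st.gen.getD (ids.getD (r - 1) 0) 0 + 1),
            q := pvPush
              (pvPush rest
                (PySem.Str.len (PySem.Str.strip (pvMergedStr L r)) +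
                   PySem.Str.len (st.key.getD (ids.getD (r + 2) 0) ""),
                 ids.getD r 0, st.gen.getD (ids.getD r 0) 0 + 1))
              (PySem.Str.len (st.key.getD (ids.getD (r - 1) 0) "") +
                 PySem.Str.len (PySem.Str.strip (pvMergedStr L r)),
               ids.getD (r - 1) 0, st.gen.getD (ids.getD (r - 1) 0) 0 + 1),
            count := st.count - 1 } := by
        simp only [pvMergeBState, hcase, htxt, hpr2, hpi1, hk1, hk2, hk3, hg1, hg2]
      have hglen : ids.getD (r - 1) 0 <
          (st.gen.set (ids.getD r 0) (st.gen.getD (ids.getD r 0) 0 + 1)).length := by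
        rw [List.length_set]; exact hpnG
      refine ⟨?_, ?_, ?_⟩
      · apply pv_reassemble st _ ids L inv r hr c g rest hq
        · rw [hstate]
          exact ⟨by simp, by simp [inv.hkey], by simp [inv.halive], by simp [inv.hnxtl],
            by simp [inv.hprvl], by simp [inv.hgenl]⟩
        · intro x; rw [hstate]; exact pv_getD_set_iff _ _ _ _ hin x
        · intro x; rw [hstate]; exact pv_getD_set_iff _ _ _ _ hinK x
        · intro x; rw [hstate]; exact pv_getD_set_iff _ _ _ _ hjnA x
        · intro x; rw [hstate, hcase]; exact pv_getD_set_iff _ _ _ _ hinN x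
        · intro x
          rw [hstate, pv_getD_set_iff _ _ _ _ hknP x]
          by_cases hx : x = ids.getD (r + 2) 0
          · rw [if_pos hx, if_pos ⟨hr2, hx⟩]
          · rw [if_neg hx, if_neg (fun h => hx h.2)]
        · intro x
          rw [hstate, pv_getD_set_iff _ _ _ _ hglen x, pv_getD_set_iff _ _ _ _ hinG x]
          by_cases hx1 : x = ids.getD r 0
          · rw [if_neg (show ¬ x = ids.getD (r - 1) 0 by
                rw [hx1]; exact hidne r (r - 1) (by omega) (by omega) (by omega)),
              if_pos hx1, if_pos hx1, hx1]
          · by_cases hx2 : x = ids.getD (r - 1) 0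
            · rw [if_pos hx2, if_neg hx1, if_pos ⟨hr1, hx2⟩, hx2]
            · rw [if_neg hx2, if_neg hx1, if_neg hx1, if_neg (fun h => hx2 h.2)]
        · intro e
          rw [hstate, pv_mem_push, pv_mem_push]
          constructor
          · rintro (rfl | rfl | h)
            · exact Or.inr (Or.inl ⟨hr1, rfl⟩)
            · exact Or.inl ⟨hr2, rfl⟩
            · exact Or.inr (Or.inr h)
          · rintro (⟨_, rfl⟩ | ⟨_, rfl⟩ | h)
            · exact Or.inr (Or.inl rfl)
            · exact Or.inl rfl
            · exact Or.inr (Or.inr h)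
        · rw [hstate]; exact pv_push_sorted _ _ (pv_push_sorted _ _ hqrest)
        · rw [hstate]
      · rw [hstate]; dsimp only; rw [pv_push_length, pv_push_length]
      · rw [hstate]

-- ---------- unfolding the loops ----------

lemma pv_loopA_succ (f : Nat) (L : List String) (t : Int) :
    pvLoopA (f + 1) L t = if (L.length : Int) > t then pvLoopA f (pvMergeA L) t else L := rfl

lemma pv_loopB_succ_eq (fuel : Nat) (st : PvStB) (t : Int) :
    pvLoopB (fuel + 1) st t =
      if (st.count : Int) > t then
        match st.q with
        | [] => st
        | (_, i, g) :: rest =>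
          match st.nxt.getD i none with
          | none => pvLoopB fuel { st with q := rest } t
          | some j =>
            if st.alive.getD i false = false ∨ st.gen.getD i 0 ≠ g then
              pvLoopB fuel { st with q := rest } t
            else
              pvLoopB fuel (pvMergeBState st i j rest) t
      else st := rfl

lemma pv_loopB_stop (f : Nat) (st : PvStB) (t : Int) (h : ¬ ((st.count : Int) > t)) :
    pvLoopB f st t = st := by
  cases f with
  | zero => rfl
  | succ f => rw [pv_loopB_succ_eq, if_neg h]

lemma pv_loopB_skip (f : Nat) (st : PvStB) (t : Int) (c : Int) (i g : Nat)
    (rest : List (Int × Nat × Nat))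
    (hcnt : (st.count : Int) > t) (hq : st.q = (c, i, g) :: rest)
    (hskip : st.nxt.getD i none = none ∨ st.alive.getD i false = false ∨ st.gen.getD i 0 ≠ g) :
    pvLoopB (f + 1) st t = pvLoopB f { st with q := rest } t := by
  rw [pv_loopB_succ_eq, if_pos hcnt, hq]
  dsimp only
  rcases hnx : st.nxt.getD i none with _ | j
  · rfl
  · dsimp only
    rw [if_pos (hskip.resolve_left (by rw [hnx]; simp))]

lemma pv_loopB_merge (f : Nat) (st : PvStB) (t : Int) (c : Int) (i g j : Nat)
    (rest : List (Int × Nat × Nat))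
    (hcnt : (st.count : Int) > t) (hq : st.q = (c, i, g) :: rest)
    (hnx : st.nxt.getD i none = some j)
    (halv : st.alive.getD i false = true) (hgg : st.gen.getD i 0 = g) :
    pvLoopB (f + 1) st t = pvLoopB f (pvMergeBState st i j rest) t := by
  rw [pv_loopB_succ_eq, if_pos hcnt, hq]
  dsimp only
  rw [hnx]
  dsimp only
  rw [if_neg (fun hor => hor.elim (fun h => by rw [halv] at h; simp at h) (fun h => h hgg))]

-- ---------- the whole loop tracks A's greedy loop ----------

lemma pv_loopB_main (fuel : Nat) :
    ∀ (st : PvStB) (ids : List Nat) (L : List String) (t : Int),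
      1 ≤ t → PvInv st ids L → st.q.length + 2 * st.count ≤ fuel →
      ∃ ids', ids'.Sublist ids ∧ PvInv (pvLoopB fuel st t) ids' (pvLoopA L.length L t) := by
  induction fuel with
  | zero =>
    intro st ids L t ht inv hfuel
    exfalso
    have h1 := inv.hcount
    have h2 := inv.hlen
    have h3 : 0 < ids.length := List.length_pos_of_ne_nil inv.hne
    omega
  | succ f ih =>
    intro st ids L t ht inv hfuel
    by_cases hcnt : (st.count : Int) > t
    · have hcnt2 : 2 ≤ st.count := by omega
      have hlen2 : 2 ≤ ids.length := by
        have h1 := inv.hcount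
        have h2 := inv.hlen
        omega
      have hq0 := inv.hqmem 0 (by omega)
      obtain ⟨e, rest, hq⟩ : ∃ e rest, st.q = e :: rest := by
        cases hqq : st.q with
        | nil => rw [hqq] at hq0; simp at hq0
        | cons a b => exact ⟨a, b, rfl⟩
      obtain ⟨c, i, g⟩ := e
      have hql : st.q.length = rest.length + 1 := by rw [hq]; rfl
      rcases hnx : st.nxt.getD i none with _ | j
      · rw [pv_loopB_skip f st t c i g rest hcnt hq (Or.inl hnx)]
        have inv' := pv_stale_step st ids L inv (c, i, g) rest hq
          (by rintro ⟨h1, h2, h3⟩; exact h3 hnx)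
        exact ih _ ids L t ht inv' (by dsimp only; omega)
      · by_cases hval : st.alive.getD i false = false ∨ st.gen.getD i 0 ≠ g
        · rw [pv_loopB_skip f st t c i g rest hcnt hq (Or.inr hval)]
          have inv' := pv_stale_step st ids L inv (c, i, g) rest hq (by
            rintro ⟨h1, h2, h3⟩
            rcases hval with h | h
            · rw [h1] at h; simp at h
            · exact h h2)
          exact ih _ ids L t ht inv' (by dsimp only; omega)
        · have halv : st.alive.getD i false = true := by
            cases h : st.alive.getD i false
            · exact absurd (Or.inl h) hval
            · rfl
          have hgg : st.gen.getD i 0 = g := by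
            by_contra h
            exact hval (Or.inr h)
          rw [pv_loopB_merge f st t c i g j rest hcnt hq hnx halv hgg]
          obtain ⟨r, hargmin, hrr, inv', hqlen, hcount'⟩ :=
            pv_merge_inv st ids L inv c i g rest hq j hnx halv hgg
          have hL2 : 2 ≤ L.length := by
            have h2 := inv.hlen
            omega
          have hlc : ((L.length : Int)) > t := by
            have h1 := inv.hcount
            omega
          have hlen' : ((L.set r (pvMergedStr L r)).eraseIdx (r + 1)).length = L.length - 1 := by
            rw [List.length_eraseIdx, List.length_set]
            have h2 := inv.hlen
            split_ifs <;> omega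
          have hAstep : pvLoopA L.length L t =
              pvLoopA ((L.set r (pvMergedStr L r)).eraseIdx (r + 1)).length
                ((L.set r (pvMergedStr L r)).eraseIdx (r + 1)) t := by
            obtain ⟨m, hm⟩ : ∃ m, L.length = m + 1 := ⟨L.length - 1, by omega⟩
            rw [hlen', hm, show m + 1 - 1 = m by omega, pv_loopA_succ,
              if_pos hlc, pv_mergeA_eq L hL2, hargmin]
          rw [hAstep]
          obtain ⟨ids2, hsub2, hinv2⟩ :=
            ih (pvMergeBState st i j rest) (ids.eraseIdx (r + 1)) _ t ht inv' (by
              rw [hcount']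
              omega)
          exact ⟨ids2, hsub2.trans (List.eraseIdx_sublist _ _), hinv2⟩
    · rw [pv_loopB_stop _ _ _ hcnt,
        pv_loopA_stop _ _ _ (by have h1 := inv.hcount; omega)]
      exact ⟨ids, List.Sublist.refl ids, inv⟩

-- ---------- the output traversal reads off the merged lines ----------

lemma pv_chainOut_succ (text : List String) (nxt : List (Option Nat)) (f : Nat) (cur : Nat) :
    pvChainOut text nxt (f + 1) cur =
      text.getD cur "" :: (match nxt.getD cur none with
        | none => []
        | some nx => pvChainOut text nxt f nx) := rfl

lemma pv_chain_out (st : PvStB) (ids : List Nat) (L : List String) (inv : PvInv st ids L) :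
    ∀ (fuel rpos : Nat), rpos < ids.length → ids.length - rpos ≤ fuel →
      pvChainOut st.text st.nxt fuel (ids.getD rpos 0) = L.drop rpos := by
  intro fuel
  induction fuel with
  | zero => intro rpos h1 h2; omega
  | succ f ih =>
    intro rpos h1 h2
    have hlen := inv.hlen
    rw [pv_chainOut_succ, inv.htext rpos h1]
    by_cases hlast : rpos + 1 = ids.length
    · rw [inv.hnxt_last rpos hlast]
      dsimp only
      rw [List.drop_eq_getElem_cons (by omega : rpos < L.length),
        List.drop_eq_nil_of_le (by omega), pv_getD_eq_getElem _ _ _ (by omega)]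
    · rw [inv.hnxt_link rpos (by omega)]
      dsimp only
      rw [ih (rpos + 1) (by omega) (by omega),
        List.drop_eq_getElem_cons (by omega : rpos < L.length),
        pv_getD_eq_getElem _ _ _ (by omega)]

-- ---------- the initial state satisfies the invariant ----------

lemma pv_getD_map_range {α : Type} (n : Nat) (f : Nat → α) (d : α) (x : Nat) (hx : x < n) :
    ((List.range n).map f).getD x d = f x := by
  rw [pv_getD_eq_getElem _ _ _ (by simp [hx])]
  simp

lemma pv_getD_range (n x : Nat) (hx : x < n) : (List.range n).getD x 0 = x := by
  rw [pv_getD_eq_getElem _ _ _ (by simp [hx])]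
  simp

lemma pv_getD_replicate {α : Type} (n : Nat) (v d : α) (x : Nat) :
    (List.replicate n v).getD x d = if x < n then v else d := by
  by_cases h : x < n
  · rw [if_pos h, pv_getD_eq_getElem _ _ _ (by simp [h])]
    simp
  · rw [if_neg h]
    apply List.getD_eq_default
    simp
    omega

lemma pv_foldl_push_mem (l : List Nat) (f : Nat → Int × Nat × Nat)
    (q0 : List (Int × Nat × Nat)) (x : Int × Nat × Nat) :
    x ∈ l.foldl (fun q i => pvPush q (f i)) q0 ↔ x ∈ q0 ∨ ∃ i ∈ l, x = f i := by
  induction l generalizing q0 with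
  | nil => simp
  | cons a l ih =>
    rw [List.foldl_cons, ih]
    constructor
    · rintro (h | ⟨i, hi, rfl⟩)
      · rcases (pv_mem_push q0 (f a) x).1 h with rfl | h
        · exact Or.inr ⟨a, List.mem_cons_self, rfl⟩
        · exact Or.inl h
      · exact Or.inr ⟨i, List.mem_cons_of_mem _ hi, rfl⟩
    · rintro (h | ⟨i, hi, rfl⟩)
      · exact Or.inl ((pv_mem_push q0 (f a) x).2 (Or.inr h))
      · rcases List.mem_cons.1 hi with rfl | hi
        · exact Or.inl ((pv_mem_push q0 (f i) (f i)).2 (Or.inl rfl))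
        · exact Or.inr ⟨i, hi, rfl⟩

lemma pv_foldl_push_sorted (l : List Nat) (f : Nat → Int × Nat × Nat)
    (q0 : List (Int × Nat × Nat)) (h : pvQSorted q0) :
    pvQSorted (l.foldl (fun q i => pvPush q (f i)) q0) := by
  induction l generalizing q0 with
  | nil => exact h
  | cons a l ih => exact ih _ (pv_push_sorted _ _ h)

lemma pv_buildQ_mem (key : List String) (x : Int × Nat × Nat) :
    x ∈ pvBuildQ key ↔ ∃ i, i < key.length - 1 ∧
      x = (PySem.Str.len (key.getD i "") + PySem.Str.len (key.getD (i + 1) ""), i, 0) := by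
  rw [pvBuildQ, pv_foldl_push_mem]
  constructor
  · rintro (h | ⟨i, hi, rfl⟩)
    · simp at h
    · exact ⟨i, List.mem_range.1 hi, rfl⟩
  · rintro ⟨i, hi, rfl⟩
    exact Or.inr ⟨i, List.mem_range.2 hi, rfl⟩

lemma pv_buildQ_sorted (key : List String) : pvQSorted (pvBuildQ key) :=
  pv_foldl_push_sorted _ _ _ (by simp [pvQSorted])

lemma pv_init_inv (lines : List String) (hn : 1 ≤ lines.length) :
    PvInv (pvInitB lines) (List.range lines.length) lines := by
  have hkeyD : ∀ s, s < lines.length →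
      (lines.map (fun s => PySem.Str.strip s)).getD s "" =
        PySem.Str.strip (lines.getD s "") := by
    intro s hs
    rw [pv_getD_eq_getElem _ _ _ (by simp [hs]), pv_getD_eq_getElem _ _ _ hs]
    simp
  refine ⟨?_, ?_, ?_, ?_, ?_, ?_, ?_, ?_, ?_, ?_, ?_, ?_, ?_, ?_, ?_, ?_, ?_, ?_, ?_, ?_, ?_, ?_⟩
  · simp [pvInitB]
  · simp [pvInitB]
  · simp [pvInitB]
  · simp [pvInitB]
  · simp [pvInitB]
  · simp
  · simp [pvInitB]
  · exact List.pairwise_lt_range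
  · intro x hx
    dsimp only [pvInitB]
    exact List.mem_range.1 hx
  · intro h
    have h2 := congrArg List.length h
    simp only [List.length_range, List.length_nil] at h2
    omega
  · exact pv_getD_range lines.length 0 (by omega)
  · -- hnxt_link
    intro r hrr
    simp only [List.length_range] at hrr
    dsimp only [pvInitB]
    rw [pv_getD_range _ _ (by omega), pv_getD_map_range _ _ _ _ (by omega),
      if_pos (by omega), pv_getD_range _ _ (by omega)]
  · -- hnxt_last
    intro r hrr
    simp only [List.length_range] at hrr
    dsimp only [pvInitB]
    rw [pv_getD_range _ _ (by omega), pv_getD_map_range _ _ _ _ (by omega),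
      if_neg (by omega)]
  · -- hprv_link
    intro r hrr
    simp only [List.length_range] at hrr
    dsimp only [pvInitB]
    rw [pv_getD_range _ _ (by omega), pv_getD_map_range _ _ _ _ (by omega),
      if_pos (by omega), pv_getD_range _ _ (by omega)]
    exact congrArg some (by omega)
  · -- hprv_head
    dsimp only [pvInitB]
    rw [pv_getD_range _ _ (by omega), pv_getD_map_range _ _ _ _ (by omega),
      if_neg (by omega)]
  · -- halive_iff
    intro x
    dsimp only [pvInitB]
    rw [pv_getD_replicate]
    by_cases hx : x < lines.length
    · rw [if_pos hx]
      simp [List.mem_range, hx]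
    · rw [if_neg hx]
      simp only [List.mem_range]
      constructor
      · intro h; simp at h
      · intro h; omega
  · -- htext
    intro s hs
    simp only [List.length_range] at hs
    dsimp only [pvInitB]
    rw [pv_getD_range _ _ (by omega)]
  · -- hkeyv
    intro s hs
    simp only [List.length_range] at hs
    dsimp only [pvInitB]
    rw [pv_getD_range _ _ (by omega), hkeyD s (by omega)]
  · -- hqsort
    dsimp only [pvInitB]
    exact pv_buildQ_sorted _
  · -- hqmem
    intro s hs
    simp only [List.length_range] at hs
    dsimp only [pvInitB]
    rw [pv_getD_range _ _ (by omega), pv_getD_replicate, if_pos (by omega)]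
    refine (pv_buildQ_mem _ _).2 ⟨s, by simp; omega, ?_⟩
    rw [hkeyD s (by omega), hkeyD (s + 1) (by omega)]
  · -- hqvalid
    intro e he h1 h2 h3
    dsimp only [pvInitB] at he
    obtain ⟨i, hi, rfl⟩ := (pv_buildQ_mem _ _).1 he
    simp only [List.length_map] at hi
    refine ⟨i, by simp; omega, by rw [pv_getD_range _ _ (by omega)], ?_⟩
    dsimp only
    rw [hkeyD i (by omega), hkeyD (i + 1) (by omega)]
  · -- hgenb
    intro e he
    dsimp only [pvInitB] at he ⊢
    obtain ⟨i, hi, rfl⟩ := (pv_buildQ_mem _ _).1 he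
    exact Nat.zero_le _

-- ===== VERDICT (by name: the statement is the Claim_ definition above) =====
theorem smart_merge_lines_spec : Claim_equal_smart_merge_lines := by
  intro lines t _hdom hpre
  unfold Spec_smart_merge_lines smart_merge_lines smart_merge_lines_alt
  by_cases hle : ((lines.length : Int)) ≤ t
  · rw [if_pos hle, pv_loopA_stop _ _ _ (by omega)]
  · rw [if_neg hle]
    have ht : 1 ≤ t := by
      rcases hpre with ⟨hnil, h0⟩ | h1
      · exfalso
        rw [hnil] at hle
        simp at hle
        omega
      · exact h1
    have hn2 : 2 ≤ lines.length := by omega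
    have hinit := pv_init_inv lines (by omega)
    obtain ⟨ids', hsub, inv'⟩ := pv_loopB_main ((pvInitB lines).q.length + 2 * lines.length)
      (pvInitB lines) (List.range lines.length) lines t ht hinit
      (by dsimp only [pvInitB]; exact le_rfl)
    have hidlen : ids'.length ≤ lines.length := by
      have h2 := hsub.length_le
      simpa using h2
    have h0lt : 0 < ids'.length := List.length_pos_of_ne_nil inv'.hne
    have hchain := pv_chain_out _ ids' _ inv' lines.length 0 h0lt (by omega)
    rw [inv'.hhead, List.drop_zero] at hchain
    exact hchain.symm
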